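-- pv_equiv track=rewrite | github.com/littletone13/ncaa_baseball | scripts/draftkings_scraper.py | _strip_mascot
-- ===== SOURCE A (Python) =====
-- _MULTI_WORD_MASCOTS = [
--     "golden eagles", "blue devils", "crimson tide", "fighting irish",
--     "yellow jackets", "red raiders", "sun devils", "horned frogs",
--     "golden bears", "demon deacons", "scarlet knights", "tar heels",
--     "red wolves", "blue hose", "golden flashes", "purple aces",
--     "golden panthers", "fighting camels", "mountain hawks", "red foxes",
--     "thundering herd", "rainbow warriors", "wolf pack",
-- ]
--
-- def _strip_mascot(name: str) -> str:
--     lower = name.strip().lower()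
--     for mascot in _MULTI_WORD_MASCOTS:
--         if lower.endswith(f" {mascot}"):
--             return lower[: -(len(mascot) + 1)].strip()
--     parts = lower.split()
--     if len(parts) >= 2:
--         return " ".join(parts[:-1])
--     return lower
-- ===== SOURCE B (Python) =====
-- # (first, last) word pairs of the multi-word mascots
-- _MASCOT_PAIRS = {
--     ("golden", "eagles"), ("blue", "devils"), ("crimson", "tide"), ("fighting", "irish"),
--     ("yellow", "jackets"), ("red", "raiders"), ("sun", "devils"), ("horned", "frogs"),
--     ("golden", "bears"), ("demon", "deacons"), ("scarlet", "knights"), ("tar", "heels"),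
--     ("red", "wolves"), ("blue", "hose"), ("golden", "flashes"), ("purple", "aces"),
--     ("golden", "panthers"), ("fighting", "camels"), ("mountain", "hawks"), ("red", "foxes"),
--     ("thundering", "herd"), ("rainbow", "warriors"), ("wolf", "pack"),
-- }
--
-- def _strip_mascot(name: str) -> str:
--     lower = name.strip().lower()
--     # Scan from the end: locate the last two spaces directly, so the last two
--     # words are extracted by index arithmetic instead of scanning a mascot list.
--     j = lower.rfind(" ")
--     if j != -1:
--         i = lower.rfind(" ", 0, j)
--         if i != -1 and (lower[i+1:j], lower[j+1:]) in _MASCOT_PAIRS: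
--             return lower[:i].strip()
--     parts = lower.split()
--     return " ".join(parts[:-1]) if len(parts) >= 2 else lower
-- ===== Notes on version B (the rewrite author's own statement) =====
-- stated objective: alternative
-- what changed: Instead of scanning the 23-mascot list with endswith, B scans the name from the end: two rfind calls locate the last two spaces, the last two words are cut out by index arithmetic and looked up as a pair in a set of (first,last) word pairs; the mascot branch never splits the string and the mascot list is never iterated per call.
import Mathlib
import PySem

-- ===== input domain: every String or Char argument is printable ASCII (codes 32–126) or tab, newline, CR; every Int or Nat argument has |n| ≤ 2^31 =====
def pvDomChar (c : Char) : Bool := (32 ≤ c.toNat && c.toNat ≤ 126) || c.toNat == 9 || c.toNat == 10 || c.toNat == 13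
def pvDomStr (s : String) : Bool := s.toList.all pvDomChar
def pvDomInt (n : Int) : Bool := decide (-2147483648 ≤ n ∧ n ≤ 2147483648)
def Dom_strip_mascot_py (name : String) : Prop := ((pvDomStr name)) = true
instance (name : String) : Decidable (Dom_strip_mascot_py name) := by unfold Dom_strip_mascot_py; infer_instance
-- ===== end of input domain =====

set_option maxRecDepth 10000


-- B scans the name from the END (two rfind calls extract the last two words by index
-- arithmetic, looked up as a pair) instead of iterating the 23-mascot list with endswith;
-- an alternative algorithm of similar cost, proved equal on all strings.

-- ===== PORT A =====
def pvMascots : List String := [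
  "golden eagles", "blue devils", "crimson tide", "fighting irish",
  "yellow jackets", "red raiders", "sun devils", "horned frogs",
  "golden bears", "demon deacons", "scarlet knights", "tar heels",
  "red wolves", "blue hose", "golden flashes", "purple aces",
  "golden panthers", "fighting camels", "mountain hawks", "red foxes",
  "thundering herd", "rainbow warriors", "wolf pack"]

-- the 'for mascot in _MULTI_WORD_MASCOTS' loop of A, with its early return
def stripMascotLoopA (lower : String) : List String → String
  | [] =>
    let parts := PySem.Str.split₀ lower
    if 2 ≤ parts.length then PySem.Str.join " " (PySem.List.slice parts none (some (-1)))
    else lower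
  | mascot :: rest =>
    if PySem.Str.endswith lower (" " ++ mascot) then
      PySem.Str.strip (PySem.Str.slice lower none (some (-(PySem.Str.len mascot + 1))))
    else stripMascotLoopA lower rest

def strip_mascot_py (name : String) : String :=
  stripMascotLoopA (PySem.Str.lower (PySem.Str.strip name)) pvMascots

-- ===== PORT B =====
-- B's module constant _MASCOT_PAIRS: the (first, last) word pairs of the mascots
def pvPairList : List (String × String) := [
  ("golden","eagles"),("blue","devils"),("crimson","tide"),("fighting","irish"),
  ("yellow","jackets"),("red","raiders"),("sun","devils"),("horned","frogs"),
  ("golden","bears"),("demon","deacons"),("scarlet","knights"),("tar","heels"),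
  ("red","wolves"),("blue","hose"),("golden","flashes"),("purple","aces"),
  ("golden","panthers"),("fighting","camels"),("mountain","hawks"),("red","foxes"),
  ("thundering","herd"),("rainbow","warriors"),("wolf","pack")]

def pvPairs : PySem.Set (String × String) := PySem.Set.ofList pvPairList

-- the fall-through tail of B (parts = lower.split(); …)
def pvFallbackB (lower : String) : String :=
  let parts := PySem.Str.split₀ lower
  if 2 ≤ parts.length then PySem.Str.join " " (PySem.List.slice parts none (some (-1)))
  else lower

def strip_mascot_py_alt (name : String) : String :=
  let lower := PySem.Str.lower (PySem.Str.strip name)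
  let j := PySem.Str.rfind lower " "
  if j ≠ -1 then
    let i := PySem.Str.rfindFrom lower " " 0 (some j)
    if i ≠ -1 ∧ PySem.Set.contains pvPairs
        (PySem.Str.slice lower (some (i+1)) (some j), PySem.Str.slice lower (some (j+1)) none) = true then
      PySem.Str.strip (PySem.Str.slice lower none (some i))
    else pvFallbackB lower
  else pvFallbackB lower

-- ===== PRECONDITION & SPEC =====
def Spec_strip_mascot_py (name : String) (out : String) : Prop := out = strip_mascot_py_alt name
instance (name : String) (out : String) : Decidable (Spec_strip_mascot_py name out) := by unfold Spec_strip_mascot_py; infer_instance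

-- ===== CLAIM (what is proved, stated in full; the proofs are below) =====
def Claim_equal_strip_mascot_py : Prop := ∀ (name : String), Dom_strip_mascot_py name → Spec_strip_mascot_py name (strip_mascot_py name)

-- ===== LEMMAS AND PROOFS =====

-- B's body as a function of the lowered string (definitionally strip_mascot_py_alt after the first let)
def pvBodyB (lower : String) : String :=
  if PySem.Str.rfind lower " " ≠ -1 then
    if PySem.Str.rfindFrom lower " " 0 (some (PySem.Str.rfind lower " ")) ≠ -1 ∧ PySem.Set.contains pvPairs
        (PySem.Str.slice lower (some (PySem.Str.rfindFrom lower " " 0 (some (PySem.Str.rfind lower " ")) + 1)) (some (PySem.Str.rfind lower " ")),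
         PySem.Str.slice lower (some (PySem.Str.rfind lower " " + 1)) none) = true then
      PySem.Str.strip (PySem.Str.slice lower none (some (PySem.Str.rfindFrom lower " " 0 (some (PySem.Str.rfind lower " ")))))
    else pvFallbackB lower
  else pvFallbackB lower

theorem pvAlt_eq_body (name : String) :
    strip_mascot_py_alt name = pvBodyB (PySem.Str.lower (PySem.Str.strip name)) := rfl

-- ----- rfind.go characterization -----
theorem pvGo_zero (s sub : List Char) :
    PySem.Chars.rfind.go s sub 0 = if sub.isPrefixOf s then 0 else -1 := rfl

theorem pvGo_succ (s sub : List Char) (j : Nat) :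
    PySem.Chars.rfind.go s sub (j+1) =
      if sub.isPrefixOf (s.drop (j+1)) then ((j:Int)+1) else PySem.Chars.rfind.go s sub j := by
  simp [PySem.Chars.rfind.go]

theorem pvGo_eq (s sub : List Char) : ∀ (k j : Nat), j ≤ k →
    sub.isPrefixOf (s.drop j) = true →
    (∀ i, j < i → i ≤ k → sub.isPrefixOf (s.drop i) = false) →
    PySem.Chars.rfind.go s sub k = (j : Int) := by
  intro k
  induction k with
  | zero =>
    intro j hj hpre _
    interval_cases j
    simp only [List.drop_zero] at hpre
    simp [pvGo_zero, hpre]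
  | succ k ih =>
    intro j hj hpre hmax
    rw [pvGo_succ]
    by_cases hj1 : j = k + 1
    · subst hj1; rw [hpre]; simp
    · rw [hmax (k+1) (by omega) (by omega)]
      simp only [Bool.false_eq_true, if_false]
      exact ih j (by omega) hpre (fun i h1 h2 => hmax i h1 (by omega))

theorem pvGo_forward (s sub : List Char) : ∀ (k : Nat),
    PySem.Chars.rfind.go s sub k ≠ -1 →
    ∃ jn : Nat, PySem.Chars.rfind.go s sub k = (jn : Int) ∧ jn ≤ k ∧
      sub.isPrefixOf (s.drop jn) = true := by
  intro k
  induction k with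
  | zero =>
    intro h
    rw [pvGo_zero] at h ⊢
    by_cases hp : sub.isPrefixOf s
    · exact ⟨0, by simp [hp], by omega, by simpa [List.drop_zero] using hp⟩
    · simp [hp] at h
  | succ k ih =>
    intro h
    rw [pvGo_succ] at h ⊢
    by_cases hp : sub.isPrefixOf (s.drop (k+1))
    · exact ⟨k+1, by simp [hp], le_refl _, hp⟩
    · simp only [hp, Bool.false_eq_true, if_false] at h ⊢
      obtain ⟨jn, h1, h2, h3⟩ := ih h
      exact ⟨jn, h1, by omega, h3⟩

-- single-char prefix after drop = that character sits at the index
theorem pvPrefix_singleton (s : List Char) (c : Char) (k : Nat) :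
    [c].isPrefixOf (s.drop k) = true ↔ s[k]? = some c := by
  have h : s[k]? = (s.drop k)[0]? := by
    rw [List.getElem?_drop, Nat.add_zero]
  rw [h]
  cases hd : s.drop k with
  | nil => simp [List.isPrefixOf]
  | cons a l =>
    simp only [List.isPrefixOf, Bool.and_true, beq_iff_eq,
      List.getElem?_cons_zero, Option.some.injEq]
    exact ⟨fun h => h ▸ rfl, fun h => h.symm⟩

-- rfind of [' '] on p ++ ' ' :: t with t space-free returns p.length
theorem pvRfind_last (p t : List Char) (ht : ∀ c ∈ t, c ≠ ' ') :
    PySem.Chars.rfind (p ++ ' ' :: t) [' '] = (p.length : Int) := by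
  unfold PySem.Chars.rfind
  apply pvGo_eq
  · simp [List.length_append]
  · rw [pvPrefix_singleton]
    rw [List.getElem?_append_right (le_refl _)]
    simp
  · intro i h1 h2
    rw [Bool.eq_false_iff]
    intro hp
    rw [pvPrefix_singleton] at hp
    rw [List.getElem?_append_right (by omega)] at hp
    rcases hi : i - p.length with _ | d
    · omega
    · rw [hi] at hp
      simp only [List.getElem?_cons_succ] at hp
      have hmem : ' ' ∈ t := List.mem_of_getElem? hp
      exact ht ' ' hmem rfl

theorem pvRfind_forward (s : List Char) (h : PySem.Chars.rfind s [' '] ≠ -1) :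
    ∃ jn : Nat, PySem.Chars.rfind s [' '] = (jn : Int) ∧ jn < s.length ∧ s[jn]? = some ' ' := by
  unfold PySem.Chars.rfind at h ⊢
  obtain ⟨jn, h1, _, h3⟩ := pvGo_forward s [' '] s.length h
  rw [pvPrefix_singleton] at h3
  exact ⟨jn, h1, (List.getElem?_eq_some_iff.mp h3).1, h3⟩

-- rfindFrom s " " 0 (some j) for 0 ≤ j ≤ len is rfind on the prefix before j
theorem pvRfindFrom_eq (s : List Char) (jn : Nat) (hj : jn ≤ s.length) :
    PySem.Chars.rfindFrom s [' '] 0 (some (jn : Int)) =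
      PySem.Chars.rfind (s.take jn) [' '] := by
  have h1 : ¬((s.length : Int) < (jn : Int)) := by exact_mod_cast Nat.not_lt.mpr hj
  have h2 : ¬((jn : Int) < 0) := by omega
  simp only [PySem.Chars.rfindFrom, h1, if_false, h2, if_neg (by omega : ¬((0:Int) < 0))]
  simp only [Int.toNat_natCast, Int.toNat_zero, List.drop_zero]
  by_cases hr : PySem.Chars.rfind (s.take jn) [' '] = -1
  · simp [hr]
  · simp [hr]

-- ----- facts about the mascot table, decided once -----
-- the (first word, last word) splitter, used only in the proofs below
def pvPairOf (m : String) : String × String :=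
  let ws := PySem.Str.split₀ m
  (ws.getD 0 "", ws.getD 1 "")

theorem pvPairs_eval : pvMascots.map pvPairOf = pvPairList := by decide

theorem pvFacts_mem : ∀ q ∈ pvPairList, (q.1 ++ " " ++ q.2) ∈ pvMascots := by decide

theorem pvNospaceB : (pvPairList.all (fun q =>
    q.1.toList.all (fun c => !(c == ' ')) && q.2.toList.all (fun c => !(c == ' ')))) = true := by decide

theorem pvFacts_nospace : ∀ q ∈ pvPairList,
    (∀ c ∈ q.1.toList, c ≠ ' ') ∧ (∀ c ∈ q.2.toList, c ≠ ' ') := by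
  have h := pvNospaceB
  simp only [List.all_eq_true, Bool.and_eq_true, Bool.not_eq_true', beq_eq_false_iff_ne] at h
  exact h

theorem pvRecon : ∀ m ∈ pvMascots,
    (pvPairOf m).1 ++ " " ++ (pvPairOf m).2 = m := by decide

theorem pvUniqueB : (pvMascots.all (fun m1 => pvMascots.all (fun m2 =>
    !((' ' :: m1.toList).isSuffixOf (' ' :: m2.toList)) || m1 == m2))) = true := by decide

theorem pvUnique : ∀ m1 ∈ pvMascots, ∀ m2 ∈ pvMascots,
    (' ' :: m1.toList) <:+ (' ' :: m2.toList) → m1 = m2 := by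
  intro m1 h1 m2 h2 hsuf
  have hb := pvUniqueB
  simp only [List.all_eq_true, Bool.or_eq_true, Bool.not_eq_true', beq_iff_eq] at hb
  rcases hb m1 h1 m2 h2 with h | h
  · rw [← List.isSuffixOf_iff_suffix] at hsuf
    rw [h] at hsuf
    cases hsuf
  · exact h

-- toList of a two-word concatenation
theorem pvToList_cat (f l : String) : (f ++ " " ++ l).toList = f.toList ++ ' ' :: l.toList := by
  simp [String.toList_append]

-- endswith via a ' '-prefixed suffix
theorem pvEndswith_iff (lower m : String) :
    PySem.Str.endswith lower (" " ++ m) = true ↔ (' ' :: m.toList) <:+ lower.toList := by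
  rw [PySem.Str.endswith_eq, PySem.Chars.endswith_iff]
  constructor
  · intro h; simpa [String.toList_append] using h
  · intro h; simpa [String.toList_append] using h

-- ----- A's loop -----
theorem pvLoop_nomatch (lower : String) : ∀ rest : List String,
    (∀ m ∈ rest, PySem.Str.endswith lower (" " ++ m) = false) →
    stripMascotLoopA lower rest = pvFallbackB lower := by
  intro rest
  induction rest with
  | nil => intro _; rfl
  | cons m rest ih =>
    intro h
    simp only [stripMascotLoopA, h m (by simp), Bool.false_eq_true, if_false]
    exact ih (fun m' hm' => h m' (by simp [hm']))

theorem pvLoop_match (lower m : String) (hmem : m ∈ pvMascots)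
    (hend : PySem.Str.endswith lower (" " ++ m) = true) :
    ∀ rest : List String, (∀ x ∈ rest, x ∈ pvMascots) → m ∈ rest →
    stripMascotLoopA lower rest =
      PySem.Str.strip (PySem.Str.slice lower none (some (-(PySem.Str.len m + 1)))) := by
  intro rest
  induction rest with
  | nil => intro _ h; cases h
  | cons m' rest ih =>
    intro hsub hin
    simp only [stripMascotLoopA]
    by_cases h' : PySem.Str.endswith lower (" " ++ m') = true
    · rw [if_pos h']
      have hs1 := (pvEndswith_iff lower m).mp hend
      have hs2 := (pvEndswith_iff lower m').mp h'
      have hmm : m' = m := by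
        rcases List.suffix_or_suffix_of_suffix hs2 hs1 with h | h
        · exact pvUnique m' (hsub m' (by simp)) m hmem h
        · exact (pvUnique m hmem m' (hsub m' (by simp)) h).symm
      rw [hmm]
    · rw [if_neg h']
      have hin' : m ∈ rest := by
        rcases List.mem_cons.mp hin with h | h
        · exact absurd (h ▸ hend) h'
        · exact h
      exact ih (fun x hx => hsub x (by simp [hx])) hin'

-- ----- the main body equality -----
theorem pvBlank : (" " : String).toList = [' '] := by decide

theorem pvCastAdd (n : Nat) : ((n : Int) + 1) = ((n + 1 : Nat) : Int) := by push_cast; ring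

theorem pv_body (lower : String) :
    stripMascotLoopA lower pvMascots = pvBodyB lower := by
  by_cases hA : ∃ m, m ∈ pvMascots ∧ PySem.Str.endswith lower (" " ++ m) = true
  · -- some mascot matches: both sides strip the prefix before it
    obtain ⟨m, hmem, hend⟩ := hA
    have hqmem : pvPairOf m ∈ pvPairList := by
      rw [← pvPairs_eval]; exact List.mem_map_of_mem hmem
    have hrec := pvRecon m hmem
    have hnos := pvFacts_nospace _ hqmem
    obtain ⟨p, hp⟩ := (pvEndswith_iff lower m).mp hend
    have hmL : m.toList = (pvPairOf m).1.toList ++ ' ' :: (pvPairOf m).2.toList := by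
      conv_lhs => rw [← hrec]
      exact pvToList_cat _ _
    have hs : lower.toList = (p ++ ' ' :: (pvPairOf m).1.toList) ++ ' ' :: (pvPairOf m).2.toList := by
      rw [← hp, hmL]; simp
    have hjC : PySem.Chars.rfind lower.toList [' '] =
        ((p ++ ' ' :: (pvPairOf m).1.toList).length : Int) := by
      rw [hs]; exact pvRfind_last _ _ hnos.2
    have hjS : PySem.Str.rfind lower " " = ((p ++ ' ' :: (pvPairOf m).1.toList).length : Int) := by
      rw [PySem.Str.rfind_eq, pvBlank, hjC]
    have hslen : (p ++ ' ' :: (pvPairOf m).1.toList).length ≤ lower.toList.length := by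
      rw [hs]; simp
    have htake : lower.toList.take (p ++ ' ' :: (pvPairOf m).1.toList).length
        = p ++ ' ' :: (pvPairOf m).1.toList := by
      conv_lhs => rw [hs]
      exact List.take_left ..
    have hiS : PySem.Str.rfindFrom lower " " 0 (some (PySem.Str.rfind lower " ")) = (p.length : Int) := by
      rw [hjS, PySem.Str.rfindFrom_eq, pvBlank, pvRfindFrom_eq _ _ hslen, htake]
      exact pvRfind_last _ _ hnos.1
    have hxval : PySem.Str.slice lower (some ((p.length : Int) + 1))
        (some ((p ++ ' ' :: (pvPairOf m).1.toList).length : Int)) = (pvPairOf m).1 := by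
      apply String.toList_inj.mp
      rw [PySem.Str.toList_slice, PySem.Chars.slice_eq_listSlice, pvCastAdd, PySem.List.slice_natCast]
      conv_lhs => rw [hs]
      rw [show (p ++ ' ' :: (pvPairOf m).1.toList) ++ ' ' :: (pvPairOf m).2.toList
            = (p ++ [' ']) ++ ((pvPairOf m).1.toList ++ ' ' :: (pvPairOf m).2.toList) by simp]
      rw [List.drop_left' (by simp)]
      rw [show (p ++ ' ' :: (pvPairOf m).1.toList).length - (p.length + 1)
            = (pvPairOf m).1.toList.length by simp; omega]
      exact List.take_left ..
    have hyval : PySem.Str.slice lower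
        (some (((p ++ ' ' :: (pvPairOf m).1.toList).length : Int) + 1)) none = (pvPairOf m).2 := by
      apply String.toList_inj.mp
      rw [PySem.Str.toList_slice, PySem.Chars.slice_eq_listSlice, pvCastAdd, PySem.List.slice_from_natCast]
      conv_lhs => rw [hs]
      rw [show (p ++ ' ' :: (pvPairOf m).1.toList) ++ ' ' :: (pvPairOf m).2.toList
            = ((p ++ ' ' :: (pvPairOf m).1.toList) ++ [' ']) ++ (pvPairOf m).2.toList by simp]
      exact List.drop_left' (by simp only [List.length_append, List.length_cons, List.length_nil])
    have hcont : PySem.Set.contains pvPairs ((pvPairOf m).1, (pvPairOf m).2) = true := by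
      apply (PySem.Set.contains_iff _ _).mpr
      apply (PySem.Set.mem_ofList _ _).mpr
      rw [show ((pvPairOf m).1, (pvPairOf m).2) = pvPairOf m from rfl]
      rw [← pvPairs_eval]
      exact List.mem_map_of_mem hmem
    -- evaluate B
    unfold pvBodyB
    rw [hiS, hjS]
    rw [if_pos (by omega : ((p ++ ' ' :: (pvPairOf m).1.toList).length : Int) ≠ -1)]
    rw [if_pos ⟨by omega, by rw [hxval, hyval]; exact hcont⟩]
    -- evaluate A
    rw [pvLoop_match lower m hmem hend pvMascots (fun x hx => hx) hmem]
    apply congrArg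
    apply String.toList_inj.mp
    rw [PySem.Str.toList_slice, PySem.Str.toList_slice,
      PySem.Chars.slice_eq_listSlice, PySem.Chars.slice_eq_listSlice]
    have hml : PySem.Str.len m = (m.toList.length : Int) := PySem.Str.len_eq m
    rw [hml, show -((m.toList.length : Int) + 1) = -((m.toList.length + 1 : Nat) : Int) by push_cast; ring]
    rw [PySem.List.slice_to_neg_natCast _ _ (by omega)]
    rw [PySem.List.slice_to _ (by omega : (0:Int) ≤ (p.length : Int))]
    rw [Int.toNat_natCast]
    have hplen : lower.toList.length - (m.toList.length + 1) = p.length := by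
      have := congrArg List.length hp
      rw [List.length_append, List.length_cons] at this
      omega
    rw [hplen]
  · -- no mascot matches: both sides run the split fallback
    push Not at hA
    have hnone : ∀ m ∈ pvMascots, PySem.Str.endswith lower (" " ++ m) = false := by
      intro m hm
      exact Bool.eq_false_iff.mpr (fun h => hA m hm h)
    rw [pvLoop_nomatch lower pvMascots hnone]
    unfold pvBodyB
    by_cases hj : PySem.Str.rfind lower " " ≠ -1
    · rw [if_pos hj]
      rw [if_neg]
      rintro ⟨hi, hcont⟩
      -- reconstruct a matching mascot from the rfind positions: contradiction
      have hj' : PySem.Chars.rfind lower.toList [' '] ≠ -1 := by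
        rw [PySem.Str.rfind_eq, pvBlank] at hj; exact hj
      obtain ⟨jn, hjn, hjlt, hjsp⟩ := pvRfind_forward lower.toList hj'
      have hjS : PySem.Str.rfind lower " " = (jn : Int) := by
        rw [PySem.Str.rfind_eq, pvBlank, hjn]
      have hiF : PySem.Str.rfindFrom lower " " 0 (some (PySem.Str.rfind lower " ")) =
          PySem.Chars.rfind (lower.toList.take jn) [' '] := by
        rw [hjS, PySem.Str.rfindFrom_eq, pvBlank]
        exact pvRfindFrom_eq lower.toList jn (by omega)
      rw [hiF] at hi hcont
      obtain ⟨inn, hinn, hinlt, hinsp⟩ := pvRfind_forward _ hi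
      rw [List.length_take] at hinlt
      have hinj : inn < jn := by omega
      have hssp : lower.toList[inn]? = some ' ' := by
        rw [← List.getElem?_take_of_lt hinj]; exact hinsp
      rw [hinn, hjS] at hcont
      have hmemP : (PySem.Str.slice lower (some ((inn : Int) + 1)) (some (jn : Int)),
          PySem.Str.slice lower (some ((jn : Int) + 1)) none) ∈ pvPairList := by
        exact (PySem.Set.mem_ofList _ _).mp ((PySem.Set.contains_iff _ _).mp hcont)
      have hmm := pvFacts_mem _ hmemP
      -- the slices reconstruct a ' '-prefixed suffix of lower
      have hX : (PySem.Str.slice lower (some ((inn : Int) + 1)) (some (jn : Int))).toList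
          = (lower.toList.drop (inn + 1)).take (jn - (inn + 1)) := by
        rw [PySem.Str.toList_slice, PySem.Chars.slice_eq_listSlice, pvCastAdd, PySem.List.slice_natCast]
      have hY : (PySem.Str.slice lower (some ((jn : Int) + 1)) none).toList
          = lower.toList.drop (jn + 1) := by
        rw [PySem.Str.toList_slice, PySem.Chars.slice_eq_listSlice, pvCastAdd, PySem.List.slice_from_natCast]
      have hjel : lower.toList[jn] = ' ' := (List.getElem?_eq_some_iff.mp hjsp).2
      have hiel : lower.toList[inn] = ' ' := (List.getElem?_eq_some_iff.mp hssp).2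
      have hdropj : lower.toList.drop jn = ' ' :: lower.toList.drop (jn + 1) := by
        rw [List.drop_eq_getElem_cons hjlt, hjel]
      have hdropi : lower.toList.drop inn = ' ' :: lower.toList.drop (inn + 1) := by
        rw [List.drop_eq_getElem_cons (by omega), hiel]
      have hmid : lower.toList.drop (inn + 1)
          = (lower.toList.drop (inn + 1)).take (jn - (inn + 1)) ++ ' ' :: lower.toList.drop (jn + 1) := by
        conv_lhs => rw [← List.take_append_drop (jn - (inn + 1)) (lower.toList.drop (inn + 1))]
        rw [List.drop_drop, show inn + 1 + (jn - (inn + 1)) = jn by omega, hdropj]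
      have hend : PySem.Str.endswith lower
          (" " ++ (PySem.Str.slice lower (some ((inn : Int) + 1)) (some (jn : Int)) ++ " " ++
            PySem.Str.slice lower (some ((jn : Int) + 1)) none)) = true := by
        rw [pvEndswith_iff, pvToList_cat, hX, hY]
        have hfull : lower.toList.drop inn
            = ' ' :: ((lower.toList.drop (inn + 1)).take (jn - (inn + 1)) ++ ' ' :: lower.toList.drop (jn + 1)) := by
          rw [hdropi]
          exact congrArg (' ' :: ·) hmid
        have hsuf := List.drop_suffix inn lower.toList
        rw [hfull] at hsuf
        exact hsuf
      exact absurd hend (by rw [hnone _ hmm]; simp)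
    · rw [if_neg hj]

-- ===== VERDICT (by name: the statement is the Claim_ definition above) =====
theorem strip_mascot_py_spec : Claim_equal_strip_mascot_py := by
  intro name _
  unfold Spec_strip_mascot_py
  rw [pvAlt_eq_body]
  exact pv_body _
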